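-- pv_equiv track=rewrite | github.com/HarryPratt/coding-practice | codality/5-TravellingCars.py | solution
-- ===== SOURCE A (Python) =====
-- def solution(A):
--     # write your code in Python 3.6
--     pre = [0] * len(A)
--     for i in range(len(A)):
--         if i == 0:
--             pre[-i - 1] = A[-i - 1]
--         else:
--             pre[-i - 1] = pre[-i] + A[-i - 1]
--     total = 0
--     for i in range(len(A)):
--         if A[i] == 0:
--             total += pre[i]
--     if total > 1000000000:
--         return -1
--     else:
--         return total
-- ===== SOURCE B (Python) =====
-- def solution(A):
--     # Single reverse pass: keep only the running suffix sum and the answer.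
--     total = 0
--     running = 0
--     for x in reversed(A):
--         running += x
--         if x == 0:
--             total += running
--     return -1 if total > 1000000000 else total
-- ===== Notes on version B (the rewrite author's own statement) =====
-- stated objective: simpler
-- what changed: Replaced the suffix-sum table built index-by-index with negative indices plus a second index scan by one reverse pass holding only a running suffix total and the accumulated answer.
import Mathlib
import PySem

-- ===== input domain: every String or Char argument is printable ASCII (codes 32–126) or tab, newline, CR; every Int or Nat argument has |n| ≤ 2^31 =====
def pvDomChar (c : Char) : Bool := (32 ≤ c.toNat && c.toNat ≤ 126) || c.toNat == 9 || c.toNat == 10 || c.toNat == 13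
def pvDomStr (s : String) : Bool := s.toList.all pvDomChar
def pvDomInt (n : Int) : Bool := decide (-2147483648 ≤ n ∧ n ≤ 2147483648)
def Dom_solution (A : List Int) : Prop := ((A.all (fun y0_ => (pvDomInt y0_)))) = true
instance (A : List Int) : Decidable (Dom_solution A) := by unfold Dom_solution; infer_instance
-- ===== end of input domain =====

-- B replaces A's suffix-sum table (built with negative indices, then scanned) by one
-- reverse pass keeping only a running suffix total and the answer; return values agree.

-- ===== PORT A =====
-- All indices are in range: pre[-i-1] is index n-1-i and pre[-i] (i ≥ 1) is index n-i,
-- so .set / .getD at those indices are exact for Python's negative indexing here.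
def solution (A : List Int) : Int :=
  let n := A.length
  let pre := (List.range n).foldl
    (fun pre i =>
      if i = 0 then
        pre.set (n - 1 - i) (A.getD (n - 1 - i) 0)
      else
        pre.set (n - 1 - i) (pre.getD (n - i) 0 + A.getD (n - 1 - i) 0))
    (List.replicate n 0)
  let total := (List.range n).foldl
    (fun total i => if A.getD i 0 = 0 then total + pre.getD i 0 else total) 0
  if total > 1000000000 then -1 else total

-- ===== PORT B =====
def solution_alt (A : List Int) : Int :=
  let s := A.reverse.foldl
    (fun (st : Int × Int) x =>
      let running := st.2 + x
      let total := if x = 0 then st.1 + running else st.1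
      (total, running)) (0, 0)
  if s.1 > 1000000000 then -1 else s.1

-- ===== PRECONDITION & SPEC =====
def Spec_solution (A : List Int) (out : Int) : Prop := out = solution_alt A
instance (A : List Int) (out : Int) : Decidable (Spec_solution A out) := by unfold Spec_solution; infer_instance

-- ===== CLAIM (what is proved, stated in full; the proofs are below) =====
def Claim_equal_solution : Prop := ∀ (A : List Int), Dom_solution A → Spec_solution A (solution A)

-- ===== LEMMAS AND PROOFS =====

/-- The suffix-sum list: `suff l` has the same length as `l` and its `j`-th entry
is the sum of `l.drop j`. -/
def suff : List Int → List Int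
  | [] => []
  | x :: xs => (x + xs.sum) :: suff xs

theorem suff_length (l : List Int) : (suff l).length = l.length := by
  induction l with
  | nil => rfl
  | cons x xs ih => simp [suff, ih]

theorem suff_head (l : List Int) : (suff l).getD 0 0 = l.sum := by
  cases l with
  | nil => simp [suff]
  | cons x xs => simp [suff]

/-- The contribution of the zero positions, summed back-to-front. -/
def totsum : List Int → Int
  | [] => 0
  | x :: xs => (if x = 0 then x + xs.sum else 0) + totsum xs

/-- Invariant of A's first loop: after processing `i = 0 … k-1` the array is
zeros followed by the suffix sums of the last `k` elements. -/
theorem solution_pre_invariant (A : List Int) (k : ℕ) (hk : k ≤ A.length) :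
    (List.range k).foldl
      (fun pre i =>
        if i = 0 then
          pre.set (A.length - 1 - i) (A.getD (A.length - 1 - i) 0)
        else
          pre.set (A.length - 1 - i) (pre.getD (A.length - i) 0 + A.getD (A.length - 1 - i) 0))
      (List.replicate A.length 0)
    = List.replicate (A.length - k) 0 ++ suff (A.drop (A.length - k)) := by
  induction k with
  | zero => simp [suff]
  | succ k ih =>
    have hk' : k ≤ A.length := Nat.le_of_succ_le hk
    rw [List.range_succ, List.foldl_append, ih hk']
    simp only [List.foldl_cons, List.foldl_nil]
    have hidx : A.length - 1 - k < A.length := by omega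
    have hdrop : A.drop (A.length - 1 - k) = A[A.length - 1 - k] :: A.drop (A.length - k) := by
      have h1 : A.length - 1 - k + 1 = A.length - k := by omega
      rw [List.drop_eq_getElem_cons hidx, h1]
    have hAget : A.getD (A.length - 1 - k) 0 = A[A.length - 1 - k] :=
      List.getD_eq_getElem A 0 hidx
    have hsucc : A.length - (k + 1) = A.length - 1 - k := by omega
    by_cases hk0 : k = 0
    · subst hk0
      rw [if_pos rfl]
      simp only [Nat.sub_zero, Nat.zero_add] at hdrop hAget ⊢
      rw [List.drop_length]
      simp only [suff, List.append_nil]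
      rw [List.set_eq_take_append_cons_drop]
      split_ifs with h
      · rw [List.take_replicate, List.drop_replicate, hdrop, List.drop_length, hAget]
        have h1 : min (A.length - 1) A.length = A.length - 1 := by omega
        have h2 : A.length - (A.length - 1 + 1) = 0 := by omega
        rw [h1, h2]
        simp [suff]
      · simp only [List.length_replicate] at h
        omega
    · rw [if_neg hk0]
      have hread :
          (List.replicate (A.length - k) (0 : Int)
            ++ suff (A.drop (A.length - k))).getD (A.length - k) 0
            = (A.drop (A.length - k)).sum := by
        rw [List.getD_append_right _ _ _ _ (by simp)]
        simp only [List.length_replicate, Nat.sub_self]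
        exact suff_head _
      rw [hread, List.set_eq_take_append_cons_drop]
      split_ifs with h
      · have htake :
            (List.replicate (A.length - k) (0 : Int)
              ++ suff (A.drop (A.length - k))).take (A.length - 1 - k)
            = List.replicate (A.length - 1 - k) 0 := by
          rw [List.take_append_of_le_length (by simp only [List.length_replicate]; omega),
            List.take_replicate]
          congr 1
          omega
        have hd1 : A.length - 1 - k + 1 = A.length - k := by omega
        have hdrop2 :
            (List.replicate (A.length - k) (0 : Int)
              ++ suff (A.drop (A.length - k))).drop (A.length - 1 - k + 1)
            = suff (A.drop (A.length - k)) := by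
          rw [hd1, List.drop_append_of_le_length (by simp), List.drop_replicate]
          simp
        rw [htake, hdrop2, hsucc, hdrop, suff, hAget]
        congr 2
        omega
      · exfalso
        simp only [List.length_append, List.length_replicate, suff_length,
          List.length_drop] at h
        omega

/-- Bridge: the index-driven second loop over two equal-length lists is the
fold over their zip. -/
theorem range_fold_zip (g : Int → Int → Int → Int) :
    ∀ (xs ys : List Int) (t0 : Int), xs.length = ys.length →
      (List.range xs.length).foldl (fun t i => g t (xs.getD i 0) (ys.getD i 0)) t0
        = (xs.zip ys).foldl (fun t p => g t p.1 p.2) t0 := by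
  intro xs
  induction xs with
  | nil => intro ys t0 h; simp
  | cons x xs ih =>
    intro ys t0 h
    cases ys with
    | nil => simp at h
    | cons y ys =>
      simp only [List.length_cons, List.range_succ_eq_map, List.foldl_cons, List.foldl_map,
        List.zip_cons_cons]
      simpa using ih ys (g t0 x y) (by simpa using h)

theorem zip_fold_totsum (A : List Int) (t0 : Int) :
    ((A.zip (suff A)).foldl (fun t p => if p.1 = 0 then t + p.2 else t) t0)
      = t0 + totsum A := by
  induction A generalizing t0 with
  | nil => simp [totsum]
  | cons x xs ih =>
    simp only [suff, List.zip_cons_cons, List.foldl_cons, totsum]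
    rw [ih]
    split_ifs <;> ring

theorem foldr_state (A : List Int) :
    A.foldr (fun x (st : Int × Int) =>
      (if x = 0 then st.1 + (st.2 + x) else st.1, st.2 + x)) (0, 0)
    = (totsum A, A.sum) := by
  induction A with
  | nil => simp [totsum]
  | cons x xs ih =>
    simp only [List.foldr_cons, ih, totsum, List.sum_cons]
    split_ifs with h <;> simp [h] <;> ring

theorem solution_eq_totsum (A : List Int) :
    solution A = if totsum A > 1000000000 then -1 else totsum A := by
  simp only [solution]
  rw [solution_pre_invariant A A.length le_rfl]
  simp only [Nat.sub_self, List.replicate_zero, List.drop_zero, List.nil_append]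
  rw [range_fold_zip (fun t a p => if a = 0 then t + p else t) A (suff A) 0
    (suff_length A).symm, zip_fold_totsum]
  simp

theorem solution_alt_eq_totsum (A : List Int) :
    solution_alt A = if totsum A > 1000000000 then -1 else totsum A := by
  simp only [solution_alt]
  rw [List.foldl_reverse, foldr_state A]

-- ===== VERDICT (by name: the statement is the Claim_ definition above) =====
theorem solution_spec : Claim_equal_solution := by
  intro A _
  unfold Spec_solution
  rw [solution_eq_totsum, solution_alt_eq_totsum]
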